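-- pv_equiv track=rewrite | github.com/BrnA122/LFP_Proyecto2_202001086 | Analizador/Analizador.py | armar_comentario
-- ===== SOURCE A (Python) =====
-- def armar_comentario(lexema):
--     estado = 0
--     valido = [3]
--
--     for char in lexema:
--         if estado == 0:
--             if char == "-":
--                 estado = 1
--             else:
--                 estado = -5
--         if estado == 1:
--             if char == "-":
--                 estado = 2
--             else:
--                 estado = -5
--         elif estado == 2:
--             if char == "-":
--                 estado = 3
--             else:
--                 estado = -5
--         elif estado == 3:
--             if char != "\n":
--                 estado = 3
--             else:
--                 estado = -5
--
--     if estado in valido: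
--         return True
--     else:
--         return False
-- ===== SOURCE B (Python) =====
-- def armar_comentario(lexema):
--     # single boolean predicate instead of the fall-through state machine
--     return len(lexema) >= 2 and lexema[0] == "-" and lexema[1] == "-" and "\n" not in lexema[2:]
-- ===== Notes on version B (the rewrite author's own statement) =====
-- stated objective: simpler
-- what changed: Replaced the fall-through DFA loop over states 0/1/2/3/-5 by a single closed-form boolean expression: length >= 2, first two characters are dashes, and no newline from index 2 on.
import Mathlib
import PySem

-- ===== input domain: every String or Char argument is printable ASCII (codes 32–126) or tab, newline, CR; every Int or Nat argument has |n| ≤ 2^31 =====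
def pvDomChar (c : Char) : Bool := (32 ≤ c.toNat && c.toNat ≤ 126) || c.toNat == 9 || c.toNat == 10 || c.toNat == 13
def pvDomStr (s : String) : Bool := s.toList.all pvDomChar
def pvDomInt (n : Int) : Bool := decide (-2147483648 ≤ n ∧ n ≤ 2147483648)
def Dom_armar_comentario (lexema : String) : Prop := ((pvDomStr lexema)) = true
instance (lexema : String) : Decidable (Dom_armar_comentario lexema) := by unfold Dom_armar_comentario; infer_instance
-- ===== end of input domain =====

-- B replaces A's fall-through state machine by one closed-form boolean predicate (objective: simpler).

-- ===== PORT A =====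
-- one iteration of A's loop body (the first 'if' falls through into the 'if/elif' chain, as in the Python)
def pasoArmar (estado : Int) (char : Char) : Int :=
  let estado := if estado == 0 then (if char == '-' then 1 else -5) else estado
  if estado == 1 then (if char == '-' then 2 else -5)
  else if estado == 2 then (if char == '-' then 3 else -5)
  else if estado == 3 then (if char != '\n' then 3 else -5)
  else estado

def armar_comentario (lexema : String) : Bool :=
  let estado := lexema.toList.foldl pasoArmar 0
  if [(3 : Int)].contains estado then true else false

-- ===== PORT B =====
def armar_comentario_alt (lexema : String) : Bool :=
  decide (2 ≤ PySem.Str.len lexema) &&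
  (PySem.Str.pyGet? lexema 0 == some '-') &&
  (PySem.Str.pyGet? lexema 1 == some '-') &&
  !(PySem.Str.isIn "\n" (PySem.Str.slice lexema (some 2) none))

-- ===== PRECONDITION & SPEC =====
def Spec_armar_comentario (lexema : String) (out : Bool) : Prop := out = armar_comentario_alt lexema
instance (lexema : String) (out : Bool) : Decidable (Spec_armar_comentario lexema out) := by unfold Spec_armar_comentario; infer_instance

-- ===== CLAIM (what is proved, stated in full; the proofs are below) =====
def Claim_equal_armar_comentario : Prop := ∀ (lexema : String), Dom_armar_comentario lexema → Spec_armar_comentario lexema (armar_comentario lexema)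

-- ===== LEMMAS AND PROOFS =====

lemma foldl_paso_neg5 (l : List Char) : l.foldl pasoArmar (-5) = -5 := by
  induction l with
  | nil => rfl
  | cons c t ih => simpa [pasoArmar] using ih

lemma foldl_paso_three (l : List Char) :
    l.foldl pasoArmar 3 = if '\n' ∈ l then -5 else 3 := by
  induction l with
  | nil => rfl
  | cons c t ih =>
    by_cases h : c = '\n'
    · simp [h, pasoArmar, foldl_paso_neg5]
    · simp [List.foldl_cons, pasoArmar, h, ih, Ne.symm h]

lemma alt_eq (lexema : String) :
    armar_comentario_alt lexema =
      (decide (2 ≤ lexema.toList.length) &&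
       (lexema.toList[0]? == some '-') &&
       (lexema.toList[1]? == some '-') &&
       !(decide ('\n' ∈ lexema.toList.drop 2))) := by
  have hsl : PySem.List.slice lexema.toList (some 2) none = lexema.toList.drop 2 := by
    simpa using PySem.List.slice_from lexema.toList (a := 2) (by norm_num)
  have hiff : PySem.Chars.isIn ['\n'] (lexema.toList.drop 2) = true ↔
      '\n' ∈ lexema.toList.drop 2 := by
    have := PySem.Str.isIn_iff_infix (sub := "\n") (s := String.ofList (lexema.toList.drop 2))
    simp only [PySem.Str.isIn_eq] at this
    simpa [List.singleton_infix_iff] using this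
  have hin : PySem.Chars.isIn ['\n'] (lexema.toList.drop 2)
      = decide ('\n' ∈ lexema.toList.drop 2) := by
    by_cases hm : '\n' ∈ lexema.toList.drop 2
    · simp [hm, hiff.mpr hm]
    · simp [hm, Bool.eq_false_iff.mpr (fun hc => hm (hiff.mp hc))]
  have hget : ∀ (i : Int) (hi : 0 ≤ i), PySem.List.pyGet? lexema.toList i = lexema.toList[i.toNat]? := by
    intro i hi
    have hlen : lexema.toList.length = lexema.length := by simp
    simp [PySem.List.pyGet?, PySem.List.pyIdx?]
    split_ifs with h
    · simp
    · simp [List.getElem?_eq_none (show lexema.toList.length ≤ i.toNat by omega)]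
  simp [armar_comentario_alt, hsl, hin, PySem.Str.len_eq,
    hget 0 (by norm_num), hget 1 (by norm_num)]

-- ===== VERDICT (by name: the statement is the Claim_ definition above) =====
theorem armar_comentario_spec : Claim_equal_armar_comentario := by
  intro lexema _
  unfold Spec_armar_comentario
  rw [alt_eq]
  rcases hl : lexema.toList with _ | ⟨c1, _ | ⟨c2, rest⟩⟩
  · simp [armar_comentario, hl]
  · by_cases h1 : c1 = '-' <;>
      simp [armar_comentario, hl, pasoArmar, h1]
  · by_cases h1 : c1 = '-'
    · by_cases h2 : c2 = '-'
      · by_cases hm : '\n' ∈ rest <;>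
          simp [armar_comentario, hl, pasoArmar, h1, h2, foldl_paso_three, hm]
      · simp [armar_comentario, hl, pasoArmar, h1, h2, foldl_paso_neg5]
    · simp [armar_comentario, hl, pasoArmar, h1, foldl_paso_neg5]
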